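-- pv_equiv track=rewrite | github.com/pypi-data/pypi-mirror-343 | packages/tech-analysis/tech_analysis-0.1.0.tar.gz/tech_analysis-0.1.0/tech_analysis/patterns.py | is_three_black_crows
-- ===== SOURCE A (Python) =====
-- def is_three_black_crows(open_, close):
--     result = []
--     for i in range(2, len(close)):
--         result.append(
--             close[i-2] > open_[i-2] and
--             close[i-1] < open_[i-1] and close[i-1] < close[i-2] and
--             close[i] < open_[i] and close[i] < close[i-1]
--         )
--     return result
-- ===== SOURCE B (Python) =====
-- def is_three_black_crows(open_, close):
--     result = []
--     run = 0            # length of current streak of "black candle with lower close"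
--     bull2 = bull1 = False
--     prev = None
--     for i, (o, c) in enumerate(zip(open_, close)):
--         run = run + 1 if (prev is not None and c < o and c < prev) else 0
--         if i >= 2:
--             result.append(bull2 and run >= 2)
--         bull2, bull1 = bull1, c > o
--         prev = c
--     return result
-- ===== Notes on version B (the rewrite author's own statement) =====
-- stated objective: alternative
-- what changed: B replaces A's per-index recomputation of five random-access comparisons by a single streaming pass over enumerate(zip(open_,close)) that maintains a running streak counter of consecutive black-and-falling candles plus two shifted bullish flags, deciding the pattern as bull-two-ago and streak>=2 with no list indexing at all.
-- outside the precondition, e.g. on is_three_black_crows([5, 0], [0, 1, 2]): A returns [False], B returns []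
import Mathlib
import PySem

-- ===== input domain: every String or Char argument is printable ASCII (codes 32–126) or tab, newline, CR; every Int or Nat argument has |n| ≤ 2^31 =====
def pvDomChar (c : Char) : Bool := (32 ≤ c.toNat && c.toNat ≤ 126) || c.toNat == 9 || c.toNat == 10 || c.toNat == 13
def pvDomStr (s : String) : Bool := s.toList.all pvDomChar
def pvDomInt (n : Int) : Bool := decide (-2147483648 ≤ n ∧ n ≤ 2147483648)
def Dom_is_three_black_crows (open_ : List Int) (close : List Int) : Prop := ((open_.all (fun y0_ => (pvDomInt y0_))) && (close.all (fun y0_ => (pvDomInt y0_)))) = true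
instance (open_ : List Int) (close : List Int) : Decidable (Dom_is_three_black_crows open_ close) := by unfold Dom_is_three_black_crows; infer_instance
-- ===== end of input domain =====

-- B is a streaming single pass keeping a streak counter and two shifted bullish flags
-- (no list indexing); A recomputes five random-access comparisons per index (alternative).

-- ===== PORT A =====
def is_three_black_crows (open_ : List Int) (close : List Int) : List Bool :=
  (PySem.List.pyRange 2 (PySem.List.len close) 1).foldl
    (fun result i =>
      result ++ [decide (PySem.List.pyGetD close (i-2) 0 > PySem.List.pyGetD open_ (i-2) 0) &&
                 (decide (PySem.List.pyGetD close (i-1) 0 < PySem.List.pyGetD open_ (i-1) 0) &&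
                  (decide (PySem.List.pyGetD close (i-1) 0 < PySem.List.pyGetD close (i-2) 0) &&
                   (decide (PySem.List.pyGetD close i 0 < PySem.List.pyGetD open_ i 0) &&
                    decide (PySem.List.pyGetD close i 0 < PySem.List.pyGetD close (i-1) 0))))]) []

-- ===== PORT B =====
-- loop body of Source B: state = (result, run, bull2, bull1, prev), input = (i, (o, c))
def tbcStep (st : List Bool × Int × Bool × Bool × Option Int) (p : Int × (Int × Int)) :
    List Bool × Int × Bool × Bool × Option Int :=
  let run' : Int :=
    match st.2.2.2.2 with
    | none => 0
    | some pc => if p.2.2 < p.2.1 ∧ p.2.2 < pc then st.2.1 + 1 else 0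
  let res' : List Bool := if 2 ≤ p.1 then st.1 ++ [st.2.2.1 && decide (2 ≤ run')] else st.1
  (res', run', st.2.2.2.1, decide (p.2.2 > p.2.1), some p.2.2)

def is_three_black_crows_alt (open_ : List Int) (close : List Int) : List Bool :=
  ((PySem.List.enumerate (open_.zip close) 0).foldl tbcStep ([], 0, false, false, none)).1

-- ===== PRECONDITION & SPEC =====
-- Pre_ excludes inputs where open_ is shorter than close while close has at least 3 entries:
-- there A raises IndexError except when the and-chain short-circuits before a missing open_ entry
-- (where A does return a value B's truncating zip cannot see; see the cite in claim.json).
def Pre_is_three_black_crows (open_ : List Int) (close : List Int) : Prop :=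
  close.length ≤ 2 ∨ close.length ≤ open_.length
instance (open_ : List Int) (close : List Int) : Decidable (Pre_is_three_black_crows open_ close) := by unfold Pre_is_three_black_crows; infer_instance
def pvWitness_is_three_black_crows : List Int × List Int := ([5, 3, 2, 1], [4, 2, 1, 0])
def Spec_is_three_black_crows (open_ : List Int) (close : List Int) (out : List Bool) : Prop := out = is_three_black_crows_alt open_ close
instance (open_ : List Int) (close : List Int) (out : List Bool) : Decidable (Spec_is_three_black_crows open_ close out) := by unfold Spec_is_three_black_crows; infer_instance

-- ===== CLAIM (what is proved, stated in full; the proofs are below) =====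
def Claim_equal_is_three_black_crows : Prop := ∀ (open_ : List Int) (close : List Int), Dom_is_three_black_crows open_ close → Pre_is_three_black_crows open_ close → Spec_is_three_black_crows open_ close (is_three_black_crows open_ close)

-- ===== LEMMAS AND PROOFS =====
-- proof-only abbreviations: per-candle facts over Nat indices
def tbcBull (open_ close : List Int) (j : Nat) : Bool :=
  decide (close.getD j 0 > open_.getD j 0)
def tbcBD (open_ close : List Int) (j : Nat) : Bool :=
  decide (close.getD j 0 < open_.getD j 0) && decide (close.getD j 0 < close.getD (j-1) 0)
-- what B appends at index i, as established by the loop invariant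
def tbcG (open_ close : List Int) (i : Int) : Bool :=
  tbcBull open_ close (i.toNat - 2) && (tbcBD open_ close i.toNat && tbcBD open_ close (i.toNat - 1))

lemma tbcBD_eq_decide (open_ close : List Int) (j : Nat) :
    tbcBD open_ close j
      = decide (close.getD j 0 < open_.getD j 0 ∧ close.getD j 0 < close.getD (j-1) 0) := by
  by_cases h1 : close.getD j 0 < open_.getD j 0 <;>
    by_cases h2 : close.getD j 0 < close.getD (j-1) 0 <;> simp [tbcBD, h1, h2]

lemma tbc_bool_shuffle (a b c d e : Bool) :
    (a && ((d && e) && (b && c))) = (a && (b && (c && (d && e)))) := by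
  cases a <;> cases b <;> cases c <;> cases d <;> cases e <;> rfl

lemma tbc_pyGetD_getD (xs : List Int) (i : Int) (h0 : 0 ≤ i) (h1 : i < (xs.length : Int)) :
    PySem.List.pyGetD xs i 0 = xs.getD i.toNat 0 := by
  rw [PySem.List.pyGetD_eq_getElem _ _ h0 h1, List.getD_eq_getElem _ _ (by omega)]

-- the loop invariant: from index k ≥ 2 on, with a correct streak counter and the two
-- shifted bullish flags, the fold appends exactly tbcG at each remaining index
lemma tbc_loop (open_ close : List Int) (hlen : close.length ≤ open_.length) :
    ∀ (m k : Nat), close.length - k = m → 2 ≤ k → k ≤ close.length →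
    ∀ (res : List Bool) (run : Int), 0 ≤ run →
      ((1 ≤ run) ↔ (tbcBD open_ close (k-1) = true)) →
    ((PySem.List.enumerate ((open_.zip close).drop k) (k : Int)).foldl tbcStep
        (res, run, tbcBull open_ close (k-2), tbcBull open_ close (k-1),
         some (close.getD (k-1) 0))).1
      = res ++ (PySem.List.pyRange (k : Int) (close.length : Int) 1).map (tbcG open_ close) := by
  intro m
  induction m with
  | zero =>
      intro k hm h2 hk res run hrun hiff
      have hd : (open_.zip close).drop k = [] := by
        apply List.drop_eq_nil_of_le
        simp only [List.length_zip]
        omega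
      rw [hd, PySem.List.enumerate_nil,
          PySem.List.pyRange_one_eq_nil (by exact_mod_cast (by omega : close.length ≤ k))]
      simp
  | succ m ih =>
      intro k hm h2 hk res run hrun hiff
      have hklt : k < close.length := by omega
      have hkz : k < (open_.zip close).length := by
        simp only [List.length_zip]; omega
      rw [List.drop_eq_getElem_cons hkz, PySem.List.enumerate_cons, List.foldl_cons]
      -- the streak-counter fact: decide (1 ≤ run) names the previous candle's black-down flag
      have hd1 : decide (1 ≤ run) = tbcBD open_ close (k-1) := by
        by_cases h1 : (1:Int) ≤ run
        · simp [h1, hiff.mp h1]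
        · have hb : tbcBD open_ close (k-1) = false := by
            cases hbb : tbcBD open_ close (k-1)
            · rfl
            · exact absurd (hiff.mpr hbb) h1
          simp [h1, hb]
      have key : decide (2 ≤ (if close.getD k 0 < open_.getD k 0 ∧ close.getD k 0 < close.getD (k-1) 0 then run + 1 else 0))
          = (tbcBD open_ close k && tbcBD open_ close (k-1)) := by
        by_cases hc2 : close.getD k 0 < open_.getD k 0 ∧ close.getD k 0 < close.getD (k-1) 0
        · rw [if_pos hc2, decide_eq_decide.mpr (by omega : (2 ≤ run + 1) ↔ (1 ≤ run)), hd1,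
              show tbcBD open_ close k = true from by
                rw [tbcBD_eq_decide]; exact decide_eq_true hc2,
              Bool.true_and]
        · rw [if_neg hc2,
              show tbcBD open_ close k = false from by
                rw [tbcBD_eq_decide]; exact decide_eq_false hc2,
              Bool.false_and]
          decide
      -- compute the step at index k
      have hstep :
          tbcStep (res, run, tbcBull open_ close (k-2), tbcBull open_ close (k-1),
              some (close.getD (k-1) 0)) ((k : Int), (open_.zip close)[k])
          = (res ++ [tbcBull open_ close (k-2) && (tbcBD open_ close k && tbcBD open_ close (k-1))],
             (if close.getD k 0 < open_.getD k 0 ∧ close.getD k 0 < close.getD (k-1) 0 then run + 1 else 0),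
             tbcBull open_ close (k-1), tbcBull open_ close k, some (close.getD k 0)) := by
        have hko : k < open_.length := by omega
        have hgz : (open_.zip close)[k]'hkz = (open_[k]'hko, close[k]'hklt) :=
          List.getElem_zip
        have ho : open_[k]'hko = open_.getD k 0 :=
          (List.getD_eq_getElem _ _ hko).symm
        have hc : close[k]'hklt = close.getD k 0 :=
          (List.getD_eq_getElem _ _ hklt).symm
        rw [hgz]
        simp only [tbcStep, ho, hc]
        rw [if_pos (by exact_mod_cast h2 : (2:Int) ≤ (k:Int))]
        rw [key]
        rfl
      rw [hstep]
      have hrw : ((k : Int) + 1) = ((k + 1 : Nat) : Int) := by push_cast; ring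
      have hb2 : tbcBull open_ close (k-1) = tbcBull open_ close ((k+1)-2) := by congr 1
      have hb1 : tbcBull open_ close k = tbcBull open_ close ((k+1)-1) := by congr 1
      have hpc : close.getD k 0 = close.getD ((k+1)-1) 0 := by congr 1
      rw [hrw, hb2, hb1, hpc]
      rw [ih (k+1) (by omega) (by omega) (by omega) _ _ (by split_ifs <;> omega)
            (by
              simp only [Nat.add_sub_cancel, tbcBD_eq_decide]
              rw [decide_eq_true_eq]
              split_ifs with hc
              · exact iff_of_true (by omega) hc
              · exact iff_of_false (by omega) hc)]
      rw [show PySem.List.pyRange (k:Int) (close.length:Int) 1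
            = (k:Int) :: PySem.List.pyRange ((k:Int)+1) (close.length:Int) 1
          from PySem.List.pyRange_one_cons (by exact_mod_cast hklt), hrw]
      rw [List.map_cons, List.append_assoc, List.singleton_append]
      have hval : (tbcBull open_ close (k-2) && (tbcBD open_ close k && tbcBD open_ close (k-1)))
          = tbcG open_ close (k : Int) := by
        simp only [tbcG]
        congr 2 <;> omega
      rw [hval]

-- B's fold, run on at least three candles, produces exactly the tbcG table
lemma tbc_alt_spec (open_ close : List Int) (hlen : close.length ≤ open_.length)
    (hn : 2 < close.length) :
    is_three_black_crows_alt open_ close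
      = (PySem.List.pyRange 2 (close.length : Int) 1).map (tbcG open_ close) := by
  rcases open_ with _ | ⟨o0, _ | ⟨o1, os⟩⟩ <;>
    try (exfalso; simp only [List.length_nil, List.length_cons] at hlen hn; omega)
  rcases close with _ | ⟨c0, _ | ⟨c1, cs⟩⟩ <;>
    try (exfalso; simp only [List.length_nil, List.length_cons] at hn; omega)
  unfold is_three_black_crows_alt
  simp only [List.zip_cons_cons, PySem.List.enumerate_cons, List.foldl_cons]
  have s0 : tbcStep ([], 0, false, false, none) ((0:Int), (o0, c0))
      = ([], 0, false, decide (c0 > o0), some c0) := by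
    simp [tbcStep]
  have s1 : tbcStep ([], 0, false, decide (c0 > o0), some c0) ((0:Int)+1, (o1, c1))
      = ([], (if c1 < o1 ∧ c1 < c0 then (0:Int) + 1 else 0),
         decide (c0 > o0), decide (c1 > o1), some c1) := by
    simp [tbcStep]
  rw [s0, s1]
  have hres := tbc_loop (o0 :: o1 :: os) (c0 :: c1 :: cs) hlen
    ((c0 :: c1 :: cs).length - 2) 2 rfl (by omega) (by omega)
    [] (if c1 < o1 ∧ c1 < c0 then (0:Int) + 1 else 0)
    (by split_ifs <;> omega)
    (by
      simp only [tbcBD_eq_decide]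
      rw [decide_eq_true_eq]
      split_ifs with hc
      · exact iff_of_true (by omega) (by simpa using hc)
      · exact iff_of_false (by omega) (by simpa using hc))
  exact hres

-- ===== VERDICT (by name: the statement is the Claim_ definition above) =====
theorem is_three_black_crows_spec : Claim_equal_is_three_black_crows := by
  intro open_ close _ hpre
  unfold Spec_is_three_black_crows
  by_cases hn : close.length ≤ 2
  · -- fewer than three candles: both sides are []
    have hA : is_three_black_crows open_ close = [] := by
      unfold is_three_black_crows
      rw [PySem.List.pyRange_one_eq_nil (by rw [PySem.List.len_eq]; exact_mod_cast hn)]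
      rfl
    have hB : is_three_black_crows_alt open_ close = [] := by
      unfold is_three_black_crows_alt
      rcases hz : open_.zip close with _ | ⟨a, _ | ⟨b, _ | ⟨c, t⟩⟩⟩
      · simp [PySem.List.enumerate_nil]
      · simp [PySem.List.enumerate_cons, PySem.List.enumerate_nil, tbcStep]
      · simp [PySem.List.enumerate_cons, PySem.List.enumerate_nil, tbcStep]
      · exfalso
        have := congrArg List.length hz
        simp only [List.length_zip, List.length_cons] at this
        omega
    rw [hA, hB]
  · have hn' : 2 < close.length := by omega
    have hlen : close.length ≤ open_.length := by
      rcases hpre with h | h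
      · omega
      · exact h
    have hA : is_three_black_crows open_ close
        = (PySem.List.pyRange 2 (close.length : Int) 1).map
            (fun i => decide (PySem.List.pyGetD close (i-2) 0 > PySem.List.pyGetD open_ (i-2) 0) &&
              (decide (PySem.List.pyGetD close (i-1) 0 < PySem.List.pyGetD open_ (i-1) 0) &&
               (decide (PySem.List.pyGetD close (i-1) 0 < PySem.List.pyGetD close (i-2) 0) &&
                (decide (PySem.List.pyGetD close i 0 < PySem.List.pyGetD open_ i 0) &&
                 decide (PySem.List.pyGetD close i 0 < PySem.List.pyGetD close (i-1) 0))))) := by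
      unfold is_three_black_crows
      rw [PySem.List.foldl_append_singleton_eq_map, List.nil_append, PySem.List.len_eq]
    rw [hA, tbc_alt_spec open_ close hlen hn']
    apply List.map_congr_left
    intro i hi
    rw [PySem.List.mem_pyRange_one] at hi
    obtain ⟨hi2, hin⟩ := hi
    have hno : (close.length : Int) ≤ (open_.length : Int) := by exact_mod_cast hlen
    -- rewrite every pyGetD access into the getD form the invariant speaks about
    have g1 : PySem.List.pyGetD close (i-2) 0 = close.getD (i.toNat - 2) 0 := by
      rw [tbc_pyGetD_getD close (i-2) (by omega) (by omega)]
      congr 1; omega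
    have g2 : PySem.List.pyGetD open_ (i-2) 0 = open_.getD (i.toNat - 2) 0 := by
      rw [tbc_pyGetD_getD open_ (i-2) (by omega) (by omega)]
      congr 1; omega
    have g3 : PySem.List.pyGetD close (i-1) 0 = close.getD (i.toNat - 1) 0 := by
      rw [tbc_pyGetD_getD close (i-1) (by omega) (by omega)]
      congr 1; omega
    have g4 : PySem.List.pyGetD open_ (i-1) 0 = open_.getD (i.toNat - 1) 0 := by
      rw [tbc_pyGetD_getD open_ (i-1) (by omega) (by omega)]
      congr 1; omega
    have g5 : PySem.List.pyGetD close i 0 = close.getD i.toNat 0 := by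
      rw [tbc_pyGetD_getD close i (by omega) (by omega)]
    have g6 : PySem.List.pyGetD open_ i 0 = open_.getD i.toNat 0 := by
      rw [tbc_pyGetD_getD open_ i (by omega) (by omega)]
    rw [g1, g2, g3, g4, g5, g6]
    simp only [tbcG, tbcBull, tbcBD]
    have hidx : i.toNat - 1 - 1 = i.toNat - 2 := by omega
    rw [hidx]
    exact (tbc_bool_shuffle _ _ _ _ _).symm
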